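-- pv_equiv track=rewrite | github.com/aphearin/umachine_pyio | umachine_pyio/process_ascii_file_into_binaries.py | _data_array_indices_from_dict
-- ===== SOURCE A (Python) =====
-- from collections import OrderedDict
--
-- def _data_array_indices_from_dict(columns_dict):
--     data_array_indices = OrderedDict()
--     icur = 0
--     for colname in columns_dict.keys():
--
--         colname_ifirst, colname_ilast = columns_dict[colname]
--         data_array_indices[colname] = (icur, icur + (colname_ilast - colname_ifirst))
--         icur += (colname_ilast - colname_ifirst) + 1
--     return data_array_indices
-- ===== SOURCE B (Python) =====
-- from collections import OrderedDict
-- from itertools import accumulate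
--
-- def _data_array_indices_from_dict(columns_dict):
--     items = list(columns_dict.items())
--     sizes = [ilast - ifirst + 1 for _, (ifirst, ilast) in items]
--     starts = accumulate(sizes, initial=0)
--     return OrderedDict(
--         (name, (s, s + sz - 1))
--         for ((name, _), s, sz) in zip(items, starts, sizes))
-- ===== Notes on version B (the rewrite author's own statement) =====
-- stated objective: alternative
-- what changed: Replaced the single mutable-cursor loop with a two-phase formulation: a per-column sizes table, a prefix-sum of starts via itertools.accumulate, and a zip assembling (start, start+size-1) per column.
import Mathlib
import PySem

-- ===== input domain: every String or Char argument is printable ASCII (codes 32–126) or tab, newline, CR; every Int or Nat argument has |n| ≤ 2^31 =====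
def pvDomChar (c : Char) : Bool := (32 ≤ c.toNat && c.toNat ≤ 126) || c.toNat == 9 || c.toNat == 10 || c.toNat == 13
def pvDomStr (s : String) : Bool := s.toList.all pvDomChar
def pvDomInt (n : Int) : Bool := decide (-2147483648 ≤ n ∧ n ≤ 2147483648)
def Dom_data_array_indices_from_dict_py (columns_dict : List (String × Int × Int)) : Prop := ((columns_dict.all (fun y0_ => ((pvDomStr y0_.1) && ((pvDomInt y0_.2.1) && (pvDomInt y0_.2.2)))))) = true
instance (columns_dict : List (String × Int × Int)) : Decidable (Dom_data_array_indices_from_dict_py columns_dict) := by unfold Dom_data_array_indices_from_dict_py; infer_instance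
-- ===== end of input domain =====

-- B replaces A's mutable-cursor pass by a sizes table + prefix-sum (accumulate) + zip; same O(n) cost, different decomposition.


-- ===== PORT A =====
-- Port of A: one pass with a mutable cursor icur, appending (icur, icur + (ilast-ifirst)).
def data_array_indices_from_dict_py (columns_dict : List (String × Int × Int)) : List (String × Int × Int) :=
  (columns_dict.foldl
    (fun (st : List (String × Int × Int) × Int) item =>
      let ifirst := item.2.1
      let ilast := item.2.2
      (st.1 ++ [(item.1, st.2, st.2 + (ilast - ifirst))], st.2 + (ilast - ifirst) + 1))
    ([], 0)).1

-- ===== PORT B =====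
-- Port of B: sizes table, prefix-sum of starts (scanl = accumulate with initial=0), then zip.
def data_array_indices_from_dict_py_alt (columns_dict : List (String × Int × Int)) : List (String × Int × Int) :=
  let sizes := columns_dict.map (fun item => item.2.2 - item.2.1 + 1)
  let starts := sizes.scanl (· + ·) 0
  (columns_dict.zip (starts.zip sizes)).map
    (fun p => (p.1.1, p.2.1, p.2.1 + p.2.2 - 1))

-- ===== PRECONDITION & SPEC =====
def Spec_data_array_indices_from_dict_py (columns_dict : List (String × Int × Int)) (out : List (String × Int × Int)) : Prop := out = data_array_indices_from_dict_py_alt columns_dict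
instance (columns_dict : List (String × Int × Int)) (out : List (String × Int × Int)) : Decidable (Spec_data_array_indices_from_dict_py columns_dict out) := by unfold Spec_data_array_indices_from_dict_py; infer_instance

-- ===== CLAIM (what is proved, stated in full; the proofs are below) =====
def Claim_equal_data_array_indices_from_dict_py : Prop := ∀ (columns_dict : List (String × Int × Int)), Dom_data_array_indices_from_dict_py columns_dict → Spec_data_array_indices_from_dict_py columns_dict (data_array_indices_from_dict_py columns_dict)

-- ===== LEMMAS AND PROOFS =====

-- ===== VERDICT (by name: the statement is the Claim_ definition above) =====
-- Loop invariant: A's fold from state (acc, icur) equals acc ++ B's zip taken with starts scanned from icur.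
lemma loop_eq (cd : List (String × Int × Int)) (acc : List (String × Int × Int)) (icur : Int) :
    (cd.foldl
      (fun (st : List (String × Int × Int) × Int) item =>
        let ifirst := item.2.1
        let ilast := item.2.2
        (st.1 ++ [(item.1, st.2, st.2 + (ilast - ifirst))], st.2 + (ilast - ifirst) + 1))
      (acc, icur)).1
    = acc ++ (cd.zip (((cd.map (fun item => item.2.2 - item.2.1 + 1)).scanl (· + ·) icur).zip
        (cd.map (fun item => item.2.2 - item.2.1 + 1)))).map
        (fun p => (p.1.1, p.2.1, p.2.1 + p.2.2 - 1)) := by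
  induction cd generalizing acc icur with
  | nil => simp
  | cons hd tl ih =>
    simp only [List.foldl_cons, List.map_cons, List.scanl_cons, List.zip_cons_cons]
    rw [ih]
    simp
    constructor
    · ring
    · ring_nf

theorem data_array_indices_from_dict_py_spec : Claim_equal_data_array_indices_from_dict_py := by
  intro cd _
  unfold Spec_data_array_indices_from_dict_py data_array_indices_from_dict_py
    data_array_indices_from_dict_py_alt
  simpa using loop_eq cd [] 0
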